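-- pv_equiv track=rewrite | github.com/Rejean-McCormick/abstract-wiki-architect | tools/harvest_lexicon.py | _merge_flat_dict
-- ===== SOURCE A (Python) =====
-- from typing import Optional, Dict, Tuple, List, Any, Iterator
--
-- def _merge_flat_dict(existing: Dict[str, Any], incoming: Dict[str, Any]) -> Tuple[Dict[str, Any], int, int]:
--     added = 0
--     updated = 0
--     out = dict(existing)
--     for k, v in incoming.items():
--         if k not in out:
--             out[k] = v
--             added += 1
--         else:
--             if out[k] != v:
--                 out[k] = v
--                 updated += 1
--     return out, added, updated
-- ===== SOURCE B (Python) =====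
-- def _merge_flat_dict(existing, incoming):
--     # Traverse EXISTING (not incoming, which is what A iterates): rebuild each
--     # existing slot, taking incoming's value only where it is present and differs,
--     # then append the brand-new incoming keys; counts fall out of the two passes.
--     out = {k: incoming[k] if k in incoming and incoming[k] != v else v
--            for k, v in existing.items()}
--     updated = sum(1 for k, v in existing.items()
--                   if k in incoming and incoming[k] != v)
--     fresh = {k: v for k, v in incoming.items() if k not in existing}
--     out.update(fresh)
--     return out, len(fresh), updated
-- ===== Notes on version B (the rewrite author's own statement) =====
-- stated objective: alternative
-- what changed: A makes one stateful pass over incoming, mutating a copy of existing and incrementing counters per key; B never iterates incoming into a mutable copy: it rebuilds the output by traversing EXISTING (choosing incoming's value where present and different), appends the fresh incoming keys as a separate filtered dict, and obtains the counts from two independent comprehensions over existing and incoming.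
import Mathlib
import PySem

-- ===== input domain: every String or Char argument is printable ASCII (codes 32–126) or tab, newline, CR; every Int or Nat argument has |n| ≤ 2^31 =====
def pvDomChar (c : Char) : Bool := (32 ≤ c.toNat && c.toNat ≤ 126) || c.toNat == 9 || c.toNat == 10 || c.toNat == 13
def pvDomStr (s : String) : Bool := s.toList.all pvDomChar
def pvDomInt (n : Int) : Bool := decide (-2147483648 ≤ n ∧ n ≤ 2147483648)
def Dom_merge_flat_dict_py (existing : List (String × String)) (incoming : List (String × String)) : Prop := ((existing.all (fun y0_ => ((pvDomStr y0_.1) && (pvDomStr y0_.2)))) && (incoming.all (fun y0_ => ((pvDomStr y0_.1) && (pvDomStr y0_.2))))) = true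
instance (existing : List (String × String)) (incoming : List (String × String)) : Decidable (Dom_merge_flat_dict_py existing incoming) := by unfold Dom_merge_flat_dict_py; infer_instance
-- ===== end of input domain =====

-- B rebuilds the output by traversing EXISTING (choosing incoming's value where present
-- and different) and appending the fresh incoming keys, with counts from two independent
-- passes, instead of A's single mutate-and-count loop over incoming (alternative
-- decomposition, same asymptotic cost).


-- ===== PORT A =====
-- A: out = dict(existing); one loop over incoming mutating out and two counters.
def merge_flat_dict_py (existing : List (String × String)) (incoming : List (String × String)) : (List (String × String)) × Int × Int :=
  let r := incoming.foldl
    (fun (s : PySem.Dict String String × Int × Int) (kv : String × String) =>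
      if !(s.1.contains kv.1) then (s.1.insert kv.1 kv.2, s.2.1 + 1, s.2.2)
      else if !(s.1.getD kv.1 "" == kv.2) then (s.1.insert kv.1 kv.2, s.2.1, s.2.2 + 1)
      else s)
    (PySem.Dict.ofList existing, 0, 0)
  (r.1.items, r.2.1, r.2.2)

-- ===== PORT B =====
-- B: dict comprehension over EXISTING choosing incoming's value where present and
-- different; `updated` by a sum over existing; `fresh` = incoming keys not in existing,
-- merged at the end; added = len(fresh).
def merge_flat_dict_py_alt (existing : List (String × String)) (incoming : List (String × String)) : (List (String × String)) × Int × Int :=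
  let e := PySem.Dict.ofList existing
  let inc := PySem.Dict.ofList incoming
  let out := PySem.Dict.ofList (e.items.map (fun kv =>
      (kv.1, if inc.contains kv.1 && !(inc.getD kv.1 "" == kv.2) then inc.getD kv.1 "" else kv.2)))
  let updated : Int := ((e.items.filter (fun kv => inc.contains kv.1 && !(inc.getD kv.1 "" == kv.2))).length : Int)
  let fresh := inc.items.filter (fun kv => !(e.contains kv.1))
  let out2 := out.update fresh
  (out2.items, (fresh.length : Int), updated)

-- ===== PRECONDITION & SPEC =====
-- Pre_ requires both key lists to be duplicate-free: the arguments are Python dicts,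
-- whose keys are necessarily distinct, and the List encoding does not enforce that
-- invariant by itself; no input expressible as a pair of Python dicts is excluded.
def Pre_merge_flat_dict_py (existing : List (String × String)) (incoming : List (String × String)) : Prop :=
  (existing.map Prod.fst).Nodup ∧ (incoming.map Prod.fst).Nodup
instance (existing : List (String × String)) (incoming : List (String × String)) : Decidable (Pre_merge_flat_dict_py existing incoming) := by unfold Pre_merge_flat_dict_py; infer_instance
def pvWitness_merge_flat_dict_py : (List (String × String)) × (List (String × String)) :=
  ([("a", "x"), ("b", "y")], [("a", "x"), ("b", "z"), ("c", "w")])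

def Spec_merge_flat_dict_py (existing : List (String × String)) (incoming : List (String × String)) (out : (List (String × String)) × Int × Int) : Prop := out = merge_flat_dict_py_alt existing incoming
instance (existing : List (String × String)) (incoming : List (String × String)) (out : (List (String × String)) × Int × Int) : Decidable (Spec_merge_flat_dict_py existing incoming out) := by unfold Spec_merge_flat_dict_py; infer_instance

-- ===== CLAIM (what is proved, stated in full; the proofs are below) =====
def Claim_equal_merge_flat_dict_py : Prop := ∀ (existing : List (String × String)) (incoming : List (String × String)), Dom_merge_flat_dict_py existing incoming → Pre_merge_flat_dict_py existing incoming → Spec_merge_flat_dict_py existing incoming (merge_flat_dict_py existing incoming)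

-- ===== LEMMAS AND PROOFS =====

-- predicate selecting the pairs of `incoming` that change the dict `d` (A's two branches)
def pvChanges (d : PySem.Dict String String) (kv : String × String) : Bool :=
  !(d.contains kv.1) || !(d.getD kv.1 "" == kv.2)

theorem pvChanges_congr (d : PySem.Dict String String) (k : String) (v : String)
    (kv : String × String) (hne : kv.1 ≠ k) :
    pvChanges (d.insert k v) kv = pvChanges d kv := by
  unfold pvChanges
  rw [PySem.Dict.contains_insert, PySem.Dict.getD_insert]
  have hb : (kv.1 == k) = false := beq_eq_false_iff_ne.mpr hne
  simp [hne, hb]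

theorem pvContains_congr (d : PySem.Dict String String) (k : String) (v : String)
    (k' : String) (hne : k' ≠ k) :
    (d.insert k v).contains k' = d.contains k' := by
  rw [PySem.Dict.contains_insert]; simp [hne]

-- main loop invariant for A's fold
theorem pvMain (inc : List (String × String)) (d : PySem.Dict String String) (a u : Int)
    (h : (inc.map Prod.fst).Nodup) :
    inc.foldl
      (fun (s : PySem.Dict String String × Int × Int) (kv : String × String) =>
        if !(s.1.contains kv.1) then (s.1.insert kv.1 kv.2, s.2.1 + 1, s.2.2)
        else if !(s.1.getD kv.1 "" == kv.2) then (s.1.insert kv.1 kv.2, s.2.1, s.2.2 + 1)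
        else s)
      (d, a, u)
    = (d.update (inc.filter (pvChanges d)),
       a + (((inc.filter (pvChanges d)).filter (fun kv => !(d.contains kv.1))).length : Int),
       u + (((inc.filter (pvChanges d)).filter (fun kv => d.contains kv.1)).length : Int)) := by
  induction inc generalizing d a u with
  | nil => simp [PySem.Dict.update]
  | cons kv rest ih =>
    rw [List.map_cons, List.nodup_cons] at h
    obtain ⟨hk, hrest⟩ := h
    have hne : ∀ x ∈ rest, x.1 ≠ kv.1 := by
      intro x hx he
      exact hk (he ▸ List.mem_map_of_mem hx)
    have hfc : rest.filter (pvChanges (d.insert kv.1 kv.2)) = rest.filter (pvChanges d) :=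
      List.filter_congr (fun x hx => pvChanges_congr d kv.1 kv.2 x (hne x hx))
    have hcc : ∀ (q : Bool → Bool),
        (rest.filter (pvChanges d)).filter (fun kv' => q ((d.insert kv.1 kv.2).contains kv'.1))
        = (rest.filter (pvChanges d)).filter (fun kv' => q (d.contains kv'.1)) := by
      intro q
      refine List.filter_congr (fun x hx => ?_)
      rw [pvContains_congr d kv.1 kv.2 x.1 (hne x (List.mem_of_mem_filter hx))]
    simp only [List.foldl_cons]
    by_cases c : d.contains kv.1 = true
    · by_cases ceq : (d.getD kv.1 "" == kv.2) = true
      · have hkv : pvChanges d kv = false := by unfold pvChanges; rw [c, ceq]; rfl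
        simp only [c, ceq, Bool.not_true, Bool.false_eq_true, if_false]
        rw [ih d a u hrest]
        simp [hkv]
      · have ceq' : (d.getD kv.1 "" == kv.2) = false := by simpa using ceq
        have hkv : pvChanges d kv = true := by unfold pvChanges; rw [c, ceq']; rfl
        simp only [c, ceq', Bool.not_true, Bool.not_false, Bool.false_eq_true, if_false, if_true]
        rw [ih (d.insert kv.1 kv.2) a (u + 1) hrest]
        rw [hfc, hcc (fun b => !b), hcc (fun b => b)]
        simp only [List.filter_cons, hkv, if_true, c, Bool.not_true, Bool.false_eq_true, if_false,
          Prod.mk.injEq]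
        refine ⟨?_, ?_, ?_⟩
        · simp [PySem.Dict.update]
        · trivial
        · simp only [List.length_cons]
          push_cast
          ring
    · have c' : d.contains kv.1 = false := by simpa using c
      have hkv : pvChanges d kv = true := by unfold pvChanges; rw [c']; rfl
      simp only [c', Bool.not_false, if_true]
      rw [ih (d.insert kv.1 kv.2) (a + 1) u hrest]
      rw [hfc, hcc (fun b => !b), hcc (fun b => b)]
      simp only [List.filter_cons, hkv, if_true, c', Bool.not_false, Bool.false_eq_true, if_false,
        Prod.mk.injEq]
      refine ⟨?_, ?_, ?_⟩
      · simp [PySem.Dict.update]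
      · simp only [List.length_cons]
        push_cast
        ring
      · trivial

-- items of ofList on a duplicate-free association list is the list itself
theorem pvItemsOfList (l : List (String × String)) (h : (l.map Prod.fst).Nodup) :
    (PySem.Dict.ofList l).items = l := by
  have := PySem.Dict.items_foldl_insert_fresh l (fun a => a.1) (fun a => a.2)
    PySem.Dict.empty (fun a _ => PySem.Dict.contains_empty (ν := String) a.1) h
  simpa [PySem.Dict.ofList, PySem.Dict.update] using this

-- first-match lookup of a key in an association list
theorem pvFindNone (l : List (String × String)) (x : String)
    (h : x ∉ l.map Prod.fst) : l.find? (fun p => p.1 == x) = none := by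
  rw [List.find?_eq_none]
  intro p hp
  simp only [beq_iff_eq]
  intro he
  exact h (he ▸ List.mem_map_of_mem hp)

theorem pvFindSelf (l : List (String × String)) (kv : String × String)
    (h : (l.map Prod.fst).Nodup) (hm : kv ∈ l) :
    l.find? (fun p => p.1 == kv.1) = some kv := by
  induction l with
  | nil => cases hm
  | cons q rest ih =>
    rw [List.map_cons, List.nodup_cons] at h
    rw [List.mem_cons] at hm
    rcases hm with hm | hm
    · subst hm; simp [List.find?]
    · have hne : q.1 ≠ kv.1 := by
        intro he
        exact h.1 (he ▸ List.mem_map_of_mem hm)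
      have : (q.1 == kv.1) = false := beq_eq_false_iff_ne.mpr hne
      simp only [List.find?, this]
      exact ih h.2 hm

-- items of d.update l, for l with distinct keys: present keys overwritten in place,
-- fresh keys appended
theorem pvUpdateItems (l : List (String × String)) (d : PySem.Dict String String)
    (hl : (l.map Prod.fst).Nodup) :
    (d.update l).items
      = d.items.map (fun kv => (kv.1, ((l.find? (fun p => p.1 == kv.1)).map Prod.snd).getD kv.2))
        ++ l.filter (fun kv => !(d.contains kv.1)) := by
  induction l generalizing d with
  | nil =>
    simp [PySem.Dict.update]
  | cons q rest ih =>
    rw [List.map_cons, List.nodup_cons] at hl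
    obtain ⟨hq, hrest⟩ := hl
    have hupd : d.update (q :: rest) = (d.insert q.1 q.2).update rest := by
      simp [PySem.Dict.update]
    rw [hupd, ih (d.insert q.1 q.2) hrest]
    have hfind_eq : ∀ kv : String × String, kv.1 = q.1 →
        ((q :: rest).find? (fun p => p.1 == kv.1)).map Prod.snd = some q.2 := by
      intro kv he
      have : (q.1 == kv.1) = true := by simp [he]
      simp [List.find?, this]
    have hfind_ne : ∀ kv : String × String, kv.1 ≠ q.1 →
        (q :: rest).find? (fun p => p.1 == kv.1) = rest.find? (fun p => p.1 == kv.1) := by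
      intro kv he
      have : (q.1 == kv.1) = false := beq_eq_false_iff_ne.mpr (Ne.symm he)
      simp [List.find?, this]
    have hmem_ne : ∀ x ∈ rest, x.1 ≠ q.1 := by
      intro x hx he
      exact hq (he ▸ List.mem_map_of_mem hx)
    have hfilter : rest.filter (fun kv => !((d.insert q.1 q.2).contains kv.1))
        = rest.filter (fun kv => !(d.contains kv.1)) := by
      refine List.filter_congr (fun x hx => ?_)
      rw [pvContains_congr d q.1 q.2 x.1 (hmem_ne x hx)]
    rw [hfilter]
    by_cases c : d.contains q.1 = true
    · rw [PySem.Dict.items_insert_of_contains _ q.2 c]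
      rw [List.map_map]
      have hmap : d.items.map
          ((fun kv => (kv.1, ((rest.find? (fun p => p.1 == kv.1)).map Prod.snd).getD kv.2)) ∘
            (fun p => if p.1 == q.1 then (q.1, q.2) else p))
          = d.items.map (fun kv =>
              (kv.1, (((q :: rest).find? (fun p => p.1 == kv.1)).map Prod.snd).getD kv.2)) := by
        refine List.map_congr_left (fun p _ => ?_)
        by_cases hp : p.1 = q.1
        · have hb : (p.1 == q.1) = true := by simp [hp]
          simp only [Function.comp_apply, hb, if_true, hfind_eq p hp]
          rw [pvFindNone rest q.1 hq]
          simp [hp]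
        · simp [Function.comp_apply, hp, hfind_ne p hp]
      rw [hmap]
      have : (q :: rest).filter (fun kv => !(d.contains kv.1))
          = rest.filter (fun kv => !(d.contains kv.1)) := by
        simp [c]
      rw [this]
    · have c' : d.contains q.1 = false := by simpa using c
      rw [PySem.Dict.items_insert_of_not_contains _ q.2 c']
      rw [List.map_append]
      have hmap : d.items.map (fun kv =>
            (kv.1, ((rest.find? (fun p => p.1 == kv.1)).map Prod.snd).getD kv.2))
          = d.items.map (fun kv =>
              (kv.1, (((q :: rest).find? (fun p => p.1 == kv.1)).map Prod.snd).getD kv.2)) := by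
        refine List.map_congr_left (fun p hp => ?_)
        have hne : p.1 ≠ q.1 := by
          intro he
          have : d.contains p.1 = true := by
            rw [PySem.Dict.contains_iff_mem_keys]
            exact PySem.Dict.mem_keys_of_mem_items d hp
          rw [he, c'] at this
          cases this
        rw [hfind_ne p hne]
      rw [hmap]
      have hqfind : ([(q.1, ((rest.find? (fun p => p.1 == q.1)).map Prod.snd).getD q.2)] :
          List (String × String)) = [q] := by
        rw [pvFindNone rest q.1 hq]
        simp
      have hfq : (q :: rest).filter (fun kv => !(d.contains kv.1))
          = q :: rest.filter (fun kv => !(d.contains kv.1)) := by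
        simp [c']
      rw [hfq]
      simp only [List.map_cons, List.map_nil] at hqfind ⊢
      rw [hqfind, List.append_assoc, List.singleton_append]

-- length of a filter over the pairs equals length of a filter over the keys when the
-- predicates agree on the list's members
theorem pvLenFilterMapFst (l : List (String × String)) (P : String × String → Bool)
    (Q : String → Bool) (h : ∀ kv ∈ l, P kv = Q kv.1) :
    (l.filter P).length = ((l.map Prod.fst).filter Q).length := by
  induction l with
  | nil => rfl
  | cons kv rest ih =>
    have hr := ih (fun x hx => h x (List.mem_cons_of_mem kv hx))
    have hkv := h kv (List.mem_cons_self)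
    by_cases hc : Q kv.1 = true
    · simp [hkv, hc, hr]
    · have hc' : Q kv.1 = false := by simpa using hc
      simp [hkv, hc', hr]

theorem merge_helper (existing incoming : List (String × String))
    (hnde : (existing.map Prod.fst).Nodup) (hndi : (incoming.map Prod.fst).Nodup) :
    merge_flat_dict_py existing incoming = merge_flat_dict_py_alt existing incoming := by
  simp only [merge_flat_dict_py, merge_flat_dict_py_alt]
  rw [pvMain incoming (PySem.Dict.ofList existing) 0 0 hndi]
  set e := PySem.Dict.ofList existing with he
  set inc := PySem.Dict.ofList incoming with hinc
  have hitemsE : e.items = existing := pvItemsOfList existing hnde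
  have hitemsI : inc.items = incoming := pvItemsOfList incoming hndi
  have hkE : e.keys.Nodup := PySem.Dict.nodup_keys_ofList existing
  have hkI : inc.keys.Nodup := PySem.Dict.nodup_keys_ofList incoming
  have hkeysE : e.keys = existing.map Prod.fst := by
    simp [PySem.Dict.keys, hitemsE]
  have hkeysI : inc.keys = incoming.map Prod.fst := by
    simp [PySem.Dict.keys, hitemsI]
  have hcontE : ∀ k, e.contains k = true ↔ k ∈ existing.map Prod.fst := by
    intro k; rw [PySem.Dict.contains_iff_mem_keys, hkeysE]
  have hcontI : ∀ k, inc.contains k = true ↔ k ∈ incoming.map Prod.fst := by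
    intro k; rw [PySem.Dict.contains_iff_mem_keys, hkeysI]
  -- value of e at a member of existing, and of inc at a member of incoming
  have hvalE : ∀ kv ∈ existing, e.getD kv.1 "" = kv.2 := by
    intro kv hkv
    exact PySem.Dict.getD_of_mem_items e (by rw [hitemsE]; exact (Prod.mk.eta (p := kv)) ▸ hkv) hkE ""
  have hvalI : ∀ kv ∈ incoming, inc.getD kv.1 "" = kv.2 := by
    intro kv hkv
    exact PySem.Dict.getD_of_mem_items inc (by rw [hitemsI]; exact (Prod.mk.eta (p := kv)) ▸ hkv) hkI ""
  set F := incoming.filter (pvChanges e) with hF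
  have hFnd : (F.map Prod.fst).Nodup := hndi.sublist (List.Sublist.map Prod.fst List.filter_sublist)
  set g : String × String → String × String := fun kv =>
    (kv.1, if inc.contains kv.1 && !(inc.getD kv.1 "" == kv.2) then inc.getD kv.1 "" else kv.2)
    with hg
  set fresh := incoming.filter (fun kv => !(e.contains kv.1)) with hfresh
  -- (F1) the fresh part of F is exactly `fresh`
  have hF1 : F.filter (fun kv => !(e.contains kv.1)) = fresh := by
    rw [hF, List.filter_filter]
    refine List.filter_congr (fun kv _ => ?_)
    unfold pvChanges
    cases hc : e.contains kv.1 <;> simp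
  -- (F3) the overwritten part of F-update is existing.map g
  have hmapA : existing.map (fun kv =>
      (kv.1, ((F.find? (fun p => p.1 == kv.1)).map Prod.snd).getD kv.2)) = existing.map g := by
    refine List.map_congr_left (fun kv hkv => ?_)
    have heC : e.contains kv.1 = true := (hcontE kv.1).mpr (List.mem_map_of_mem hkv)
    have heV : e.getD kv.1 "" = kv.2 := hvalE kv hkv
    by_cases hc : inc.contains kv.1 = true
    · obtain ⟨p, hpmem, hpk⟩ : ∃ p ∈ incoming, p.1 = kv.1 := by
        rcases List.mem_map.mp ((hcontI kv.1).mp hc) with ⟨p, hp, hpk⟩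
        exact ⟨p, hp, hpk⟩
      have hpv : p.2 = inc.getD kv.1 "" := by rw [← hpk]; exact (hvalI p hpmem).symm
      by_cases hv : (inc.getD kv.1 "" == kv.2) = true
      · -- value unchanged: kv.1 is not a key of F, keep kv.2
        have hnotF : kv.1 ∉ F.map Prod.fst := by
          intro hmem
          rcases List.mem_map.mp hmem with ⟨r, hrF, hrk⟩
          have hrinc : r ∈ incoming := List.mem_of_mem_filter hrF
          have hrch : pvChanges e r = true := List.of_mem_filter hrF
          have hrv : r.2 = inc.getD kv.1 "" := by rw [← hrk]; exact (hvalI r hrinc).symm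
          have : r.2 = kv.2 := by rw [hrv]; exact eq_of_beq hv
          unfold pvChanges at hrch
          rw [hrk, heC, heV, this] at hrch
          simp at hrch
        rw [pvFindNone F kv.1 hnotF, hg]
        simp [hc, hv]
      · -- value changed: F finds (kv.1, inc[kv.1])
        have hv' : (inc.getD kv.1 "" == kv.2) = false := by simpa using hv
        have hpF : p ∈ F := by
          rw [hF, List.mem_filter]
          refine ⟨hpmem, ?_⟩
          unfold pvChanges
          have hv2 : (kv.2 == inc.getD kv.1 "") = false := by rw [Bool.beq_comm]; exact hv'
          rw [hpk, heC, heV, hpv, hv2]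
          simp
        have := pvFindSelf F p hFnd hpF
        rw [hpk] at this
        rw [this, hg]
        simp [hc, ← hpv]
    · -- key absent from incoming: not in F either
      have hc' : inc.contains kv.1 = false := by simpa using hc
      have hnotF : kv.1 ∉ F.map Prod.fst := by
        intro hmem
        rcases List.mem_map.mp hmem with ⟨r, hrF, hrk⟩
        have hrinc : r ∈ incoming := List.mem_of_mem_filter hrF
        have : inc.contains kv.1 = true := (hcontI kv.1).mpr (hrk ▸ List.mem_map_of_mem hrinc)
        rw [hc'] at this
        cases this
      rw [pvFindNone F kv.1 hnotF, hg]
      simp [hc']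
  -- (F4) B's output dict: fresh keys appended to the rebuilt existing slots
  have hmfst : (existing.map g).map Prod.fst = existing.map Prod.fst := by
    rw [List.map_map]
    exact List.map_congr_left (fun kv _ => rfl)
  have houtItems : (PySem.Dict.ofList (existing.map g)).items = existing.map g :=
    pvItemsOfList (existing.map g) (by rw [hmfst]; exact hnde)
  have houtKeys : ∀ k, (PySem.Dict.ofList (existing.map g)).contains k = e.contains k := by
    intro k
    by_cases hk : k ∈ existing.map Prod.fst
    · have h1 : (PySem.Dict.ofList (existing.map g)).contains k = true := by
        rw [PySem.Dict.contains_iff_mem_keys]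
        simp only [PySem.Dict.keys, houtItems]
        rw [hmfst]; exact hk
      rw [h1, ((hcontE k).mpr hk)]
    · have h1 : ¬ (PySem.Dict.ofList (existing.map g)).contains k = true := by
        rw [PySem.Dict.contains_iff_mem_keys]
        simp only [PySem.Dict.keys, houtItems]
        rw [hmfst]; exact hk
      have h2 : ¬ e.contains k = true := fun hx => hk ((hcontE k).mp hx)
      rw [Bool.not_eq_true] at h1 h2
      rw [h1, h2]
  have hBout : ((PySem.Dict.ofList (existing.map g)).update fresh).items
      = existing.map g ++ fresh := by
    have hfreshNd : (fresh.map Prod.fst).Nodup :=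
      hndi.sublist (List.Sublist.map Prod.fst List.filter_sublist)
    have hdisj : ∀ a ∈ fresh, (PySem.Dict.ofList (existing.map g)).contains a.1 = false := by
      intro a ha
      have : (!(e.contains a.1)) = true := (List.mem_filter.mp ha).2
      rw [houtKeys a.1]
      simpa using this
    have := PySem.Dict.items_foldl_insert_fresh fresh (fun a => a.1) (fun a => a.2)
      (PySem.Dict.ofList (existing.map g)) hdisj hfreshNd
    rw [houtItems] at this
    simpa [PySem.Dict.update] using this
  -- (F2) the updated count: pairs of F already present ↔ existing slots that change
  set Q : String → Bool := fun k => e.contains k && inc.contains k && !(e.getD k "" == inc.getD k "")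
    with hQdef
  have hlen1 : (F.filter (fun kv => e.contains kv.1)).length
      = ((incoming.map Prod.fst).filter Q).length := by
    have hFf : F.filter (fun kv => e.contains kv.1)
        = incoming.filter (fun kv => e.contains kv.1 && pvChanges e kv) := by
      rw [hF, List.filter_filter]
    rw [hFf]
    refine pvLenFilterMapFst incoming _ Q (fun kv hkv => ?_)
    have hvI : inc.getD kv.1 "" = kv.2 := hvalI kv hkv
    have hcI : inc.contains kv.1 = true := (hcontI kv.1).mpr (List.mem_map_of_mem hkv)
    unfold pvChanges
    rw [hQdef]
    simp only [hvI, hcI]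
    cases hce : e.contains kv.1 <;> simp
  have hlen2 : (existing.filter (fun kv => inc.contains kv.1 && !(inc.getD kv.1 "" == kv.2))).length
      = ((existing.map Prod.fst).filter Q).length := by
    refine pvLenFilterMapFst existing _ Q (fun kv hkv => ?_)
    have hvE : e.getD kv.1 "" = kv.2 := hvalE kv hkv
    have hcE : e.contains kv.1 = true := (hcontE kv.1).mpr (List.mem_map_of_mem hkv)
    rw [hQdef]
    simp only [hvE, hcE]
    rw [Bool.beq_comm]
    simp
  have hperm : ((incoming.map Prod.fst).filter Q).length
      = ((existing.map Prod.fst).filter Q).length := by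
    refine List.Perm.length_eq ?_
    rw [List.perm_ext_iff_of_nodup (hndi.filter Q) (hnde.filter Q)]
    intro k
    simp only [List.mem_filter]
    constructor
    · rintro ⟨-, hq⟩
      refine ⟨?_, hq⟩
      have : e.contains k = true := by
        rw [hQdef] at hq
        exact Bool.and_elim_left (Bool.and_elim_left hq)
      exact (hcontE k).mp this
    · rintro ⟨-, hq⟩
      refine ⟨?_, hq⟩
      have : inc.contains k = true := by
        rw [hQdef] at hq
        exact Bool.and_elim_right (Bool.and_elim_left hq)
      exact (hcontI k).mp this
  -- assemble the triple
  refine Prod.ext ?_ (Prod.ext ?_ ?_)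
  · -- items
    show (e.update F).items = _
    rw [pvUpdateItems F e hFnd, hitemsE, hitemsI, hF1, hmapA, ← hBout]
  · -- added
    show (0 : Int) + _ = _
    rw [hitemsI, hF1]
    simp [hfresh]
  · -- updated
    show (0 : Int) + _ = _
    rw [hitemsE, hlen1, hlen2, hperm]
    simp

-- ===== VERDICT (by name: the statement is the Claim_ definition above) =====
theorem merge_flat_dict_py_spec : Claim_equal_merge_flat_dict_py := by
  intro existing incoming _ hpre
  exact merge_helper existing incoming hpre.1 hpre.2
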